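-- pv_equiv track=rewrite | github.com/poodlez/declan-primes | prime_qubit.py | factor_eisenstein
-- ===== SOURCE A (Python) =====
-- def factor_eisenstein(p):
--     """Factor prime p in Z[ω]. Returns (a, b, type) where p = (a+bω)(a+bω²)."""
--     if p == 3:
--         return (1, 1, 'ramified')
--     if p % 3 == 2:
--         return (p, 0, 'inert')
--     if p % 3 == 1:
--         for a in range(0, p + 1):
--             for b in range(1, p + 1):
--                 if a * a - a * b + b * b == p:
--                     return (a, b, 'split')
--     return None
-- ===== SOURCE B (Python) =====
-- def factor_eisenstein(p):
--     """Factor prime p in Z[omega]. Returns (a, b, type) where p = (a+b*omega)(a+b*omega**2)."""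
--     if p == 3:
--         return (1, 1, 'ramified')
--     if p % 3 == 2:
--         return (p, 0, 'inert')
--     if p % 3 == 1:
--         # b solves b*b - a*b + (a*a - p) = 0, i.e. (2b - a)^2 = 4p - 3a^2:
--         # scan a upward while the discriminant is nonnegative, keeping a
--         # decreasing integer square root s of it (two-pointer, no re-sqrt).
--         s = 0
--         while (s + 1) * (s + 1) <= 4 * p:
--             s += 1
--         a = 0
--         while 3 * a * a <= 4 * p:
--             m = 4 * p - 3 * a * a
--             while s * s > m:
--                 s -= 1
--             if s * s == m:
--                 b = (a - s) // 2
--                 if b < 1: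
--                     b = (a + s) // 2
--                 if b >= 1:
--                     return (a, b, 'split')
--             a += 1
--     return None
-- ===== Notes on version B (the rewrite author's own statement) =====
-- stated objective: alternative
-- what changed: Instead of brute-force scanning all pairs (a,b), B scans a alone and solves the quadratic for b via the discriminant 4p-3a^2, maintained with a monotone decreasing integer square root (two-pointer).
import Mathlib
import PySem

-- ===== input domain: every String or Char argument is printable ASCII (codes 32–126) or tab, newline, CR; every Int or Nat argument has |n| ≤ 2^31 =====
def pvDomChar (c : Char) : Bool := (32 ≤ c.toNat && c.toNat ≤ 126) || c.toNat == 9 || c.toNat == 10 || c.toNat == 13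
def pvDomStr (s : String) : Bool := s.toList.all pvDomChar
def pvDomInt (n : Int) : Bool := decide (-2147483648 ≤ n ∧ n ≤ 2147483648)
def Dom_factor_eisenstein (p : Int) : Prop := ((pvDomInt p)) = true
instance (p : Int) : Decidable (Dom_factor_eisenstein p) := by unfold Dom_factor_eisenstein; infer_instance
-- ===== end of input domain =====

-- B replaces A's brute-force double loop over (a, b) by a single scan over a that solves
-- the quadratic for b via the discriminant 4p-3a^2, maintained with a monotone decreasing
-- integer square root (an alternative algorithm; equivalence of return values is proved).


-- ===== PORT A =====
def factor_eisenstein (p : Int) : Option (Int × Int × String) :=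
  if p = 3 then some (1, 1, "ramified")
  else if PySem.Int.mod p 3 = 2 then some (p, 0, "inert")
  else if PySem.Int.mod p 3 = 1 then
    (PySem.List.pyRange 0 (p+1) 1).findSome? (fun a =>
      (PySem.List.pyRange 1 (p+1) 1).findSome? (fun b =>
        if a*a - a*b + b*b = p then some (a, b, "split") else none))
  else none

-- ===== PORT B =====
-- while (s+1)*(s+1) <= 4*p: s += 1    (s is Python's nonnegative int, carried as Nat;
-- the fuel argument only makes the loop total: it is never exhausted on the calls made)
def pvSqrtUp (p : Int) : Nat → Nat → Nat
  | 0, s => s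
  | n+1, s => if ((s:Int)+1) * ((s:Int)+1) ≤ 4*p then pvSqrtUp p n (s+1) else s

-- while s*s > m: s -= 1    (structural recursion on s; Python's s stays ≥ 0 since m ≥ 0)
def pvSqrtDown (m : Int) : Nat → Nat
  | 0 => 0
  | s+1 => if m < ((s:Int)+1)*((s:Int)+1) then pvSqrtDown m s else s+1

-- while 3*a*a <= 4*p: body    (a is Python's nonnegative int, carried as Nat;
-- the fuel argument only makes the loop total: it is never exhausted on the calls made)
def pvALoop (p : Int) : Nat → Nat → Nat → Option (Int × Int × String)
  | 0, _, _ => none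
  | n+1, a, s =>
    if 3*(a:Int)*(a:Int) ≤ 4*p then
      let m := 4*p - 3*(a:Int)*(a:Int)
      let s' := pvSqrtDown m s
      if ((s':Int))*((s':Int)) = m then
        let b0 := PySem.Int.floordiv ((a:Int) - (s':Int)) 2
        let b := if b0 < 1 then PySem.Int.floordiv ((a:Int) + (s':Int)) 2 else b0
        if 1 ≤ b then some ((a:Int), b, "split") else pvALoop p n (a+1) s'
      else pvALoop p n (a+1) s'
    else none

def factor_eisenstein_alt (p : Int) : Option (Int × Int × String) :=
  if p = 3 then some (1, 1, "ramified")
  else if PySem.Int.mod p 3 = 2 then some (p, 0, "inert")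
  else if PySem.Int.mod p 3 = 1 then
    pvALoop p (4*p+1).toNat 0 (pvSqrtUp p (4*p).toNat 0)
  else none

-- ===== PRECONDITION & SPEC =====
def Spec_factor_eisenstein (p : Int) (out : Option (Int × Int × String)) : Prop := out = factor_eisenstein_alt p
instance (p : Int) (out : Option (Int × Int × String)) : Decidable (Spec_factor_eisenstein p out) := by unfold Spec_factor_eisenstein; infer_instance

-- ===== CLAIM (what is proved, stated in full; the proofs are below) =====
def Claim_equal_factor_eisenstein : Prop := ∀ (p : Int), Dom_factor_eisenstein p → Spec_factor_eisenstein p (factor_eisenstein p)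

-- ===== LEMMAS AND PROOFS =====

-- A's inner loop body, abbreviated
def pvInner (p a : Int) : Option (Int × Int × String) :=
  (PySem.List.pyRange 1 (p+1) 1).findSome? (fun b =>
    if a*a - a*b + b*b = p then some (a, b, "split") else none)

-- least b ≥ 1 with a*a - a*b + b*b = p, by the discriminant (proof-side reference)
def pvChoose (a s : Int) : Int :=
  if PySem.Int.floordiv (a - s) 2 < 1 then PySem.Int.floordiv (a + s) 2
  else PySem.Int.floordiv (a - s) 2

def pvBmin (p a : Int) : Option Int :=
  if 0 ≤ 4*p - 3*a*a ∧
      (Nat.sqrt (4*p - 3*a*a).toNat : Int) * (Nat.sqrt (4*p - 3*a*a).toNat : Int) = 4*p - 3*a*a then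
    if 1 ≤ pvChoose a (Nat.sqrt (4*p - 3*a*a).toNat : Int)
    then some (pvChoose a (Nat.sqrt (4*p - 3*a*a).toNat : Int))
    else none
  else none

lemma pv_findSome?_if {α : Type} (q : Int → Prop) [DecidablePred q] (h : Int → α) (l : List Int) :
    l.findSome? (fun b => if q b then some (h b) else none) = (l.find? (fun b => decide (q b))).map h := by
  induction l with
  | nil => rfl
  | cons x l ih =>
    by_cases hx : q x <;> simp [hx, ih]

lemma pv_key (p a b : Int) : a*a - a*b + b*b = p ↔ (2*b-a)*(2*b-a) = 4*p - 3*a*a := by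
  have h : (2*b-a)*(2*b-a) = 4*(a*a-a*b+b*b) - 3*a*a := by ring
  omega

lemma pv_sqrt_eq (m t : Int) (h : t*t = m) :
    (Nat.sqrt m.toNat : Int) * (Nat.sqrt m.toNat : Int) = m := by
  have hm : 0 ≤ m := h ▸ mul_self_nonneg t
  have h3 : ((t.natAbs * t.natAbs : Nat) : Int) = m := by
    exact_mod_cast (Int.natAbs_mul_self' t).trans h
  have h2 : m.toNat = t.natAbs * t.natAbs := by omega
  rw [h2, Nat.sqrt_eq]
  exact_mod_cast h3

lemma pv_find?_pyRange_none (q : Int → Bool) (lo hi : Int)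
    (h : ∀ x, lo ≤ x → x < hi → ¬ q x) :
    (PySem.List.pyRange lo hi 1).find? q = none := by
  rw [List.find?_eq_none]
  intro x hx
  rw [PySem.List.mem_pyRange_one] at hx
  exact fun hq => h x hx.1 hx.2 hq


lemma pv_find?_pyRange_least (q : Int → Bool) (hi b0 : Int)
    (h2 : b0 < hi) (h3 : q b0) :
    ∀ (n : Nat) (lo : Int), b0 - lo = n → lo ≤ b0 →
      (∀ x, lo ≤ x → x < b0 → ¬ q x) →
      (PySem.List.pyRange lo hi 1).find? q = some b0 := by
  intro n
  induction n with
  | zero =>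
    intro lo hn hlo _
    have he : lo = b0 := by omega
    subst he
    rw [PySem.List.pyRange_one_cons (by omega)]
    simp [h3]
  | succ n ih =>
    intro lo hn hlo h4
    have hlt : lo < b0 := by omega
    rw [PySem.List.pyRange_one_cons (by omega)]
    rw [List.find?_cons]
    have hq : q lo = false := by
      have := h4 lo le_rfl hlt
      simpa using this
    rw [hq]
    exact ih (lo+1) (by omega) (by omega) (fun x hx1 hx2 => h4 x (by omega) hx2)

lemma pv_sqrtDown_eq (m : Int) (s : Nat) (hm : 0 ≤ m) (hs : Nat.sqrt m.toNat ≤ s) :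
    pvSqrtDown m s = Nat.sqrt m.toNat := by
  induction s with
  | zero => simp [pvSqrtDown]; omega
  | succ s ih =>
    rw [pvSqrtDown]
    by_cases h : m < ((s:Int)+1)*((s:Int)+1)
    · rw [if_pos h]
      apply ih
      have hc : ((((s+1)*(s+1) : Nat)) : Int) = ((s:Int)+1)*((s:Int)+1) := by push_cast; ring
      have hlt : m.toNat < (s+1)*(s+1) := by omega
      have := Nat.sqrt_lt.mpr hlt
      omega
    · rw [if_neg h]
      have hc : ((((s+1)*(s+1) : Nat)) : Int) = ((s:Int)+1)*((s:Int)+1) := by push_cast; ring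
      have hle : (s+1)*(s+1) ≤ m.toNat := by omega
      have := Nat.le_sqrt.mpr hle
      omega

lemma pv_sqrt_char (p : Int) (s : Nat) (h1 : (s:Int)*(s:Int) ≤ 4*p)
    (h2 : 4*p < ((s:Int)+1)*((s:Int)+1)) : s = Nat.sqrt (4*p).toNat := by
  have hc1 : (((s*s : Nat)) : Int) = (s:Int)*(s:Int) := by push_cast; ring
  have hc2 : ((((s+1)*(s+1) : Nat)) : Int) = ((s:Int)+1)*((s:Int)+1) := by push_cast; ring
  have hp : 0 ≤ 4*p := le_trans (by positivity) h1
  have hle : s*s ≤ (4*p).toNat := by omega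
  have hlt : (4*p).toNat < (s+1)*(s+1) := by omega
  have ha := Nat.le_sqrt.mpr hle
  have hb := Nat.sqrt_lt.mpr hlt
  omega

lemma pv_sqrtUp_eq_aux (p : Int) :
    ∀ (n : Nat) (s : Nat), (4*p - (s:Int)*(s:Int)).toNat ≤ n → (s:Int)*(s:Int) ≤ 4*p →
      pvSqrtUp p n s = Nat.sqrt (4*p).toNat := by
  intro n
  induction n with
  | zero =>
    intro s hn hs
    show s = Nat.sqrt (4*p).toNat
    have he : ((s:Int)+1)*((s:Int)+1) = (s:Int)*(s:Int) + (2*(s:Int)+1) := by ring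
    have hs0 : (0:Int) ≤ (s:Int) := Int.natCast_nonneg s
    exact pv_sqrt_char p s hs (by omega)
  | succ n ih =>
    intro s hn hs
    rw [pvSqrtUp]
    have he : ((s:Int)+1)*((s:Int)+1) = (s:Int)*(s:Int) + (2*(s:Int)+1) := by ring
    have hs0 : (0:Int) ≤ (s:Int) := Int.natCast_nonneg s
    have hc : ((s+1:Nat):Int) = (s:Int)+1 := by push_cast; ring
    by_cases hg : ((s:Int)+1) * ((s:Int)+1) ≤ 4*p
    · rw [if_pos hg]
      rw [he] at hg
      refine ih (s+1) ?_ ?_ <;> rw [hc, he] <;> omega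
    · rw [if_neg hg]
      exact pv_sqrt_char p s hs (by omega)

lemma pv_roots (p a b s : Int) (hs : 0 ≤ s) (hsq : s*s = 4*p - 3*a*a)
    (hb : a*a - a*b + b*b = p) : 2*b = a - s ∨ 2*b = a + s := by
  have h1 := (pv_key p a b).mp hb
  have h0 : (2*b-a-s)*(2*b-a+s) = (2*b-a)*(2*b-a) - s*s := by ring
  have h2 : (2*b-a-s)*(2*b-a+s) = 0 := by omega
  rcases mul_eq_zero.mp h2 with h | h <;> omega

lemma pv_ble (p a b : Int) (hp : 1 ≤ p) (_hb1 : 1 ≤ b) (h : a*a - a*b + b*b = p) : b ≤ p := by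
  nlinarith [mul_self_nonneg (2*a-b), mul_self_nonneg (b-1)]

lemma pv_floordiv_double (r : Int) : PySem.Int.floordiv (r+r) 2 = r := by
  rw [PySem.Int.floordiv_eq_ediv_of_pos (by norm_num)]; omega

lemma pv_inner_eq (p a : Int) (hp : 1 ≤ p) (_ha : 0 ≤ a) :
    pvInner p a = (pvBmin p a).map (fun b => (a, b, "split"))  := by
  unfold pvInner pvBmin
  rw [pv_findSome?_if (q := fun b => a*a - a*b + b*b = p) (h := fun b => ((a, b, "split") : Int × Int × String))]
  unfold pvChoose
  set m : Int := 4*p - 3*a*a with hm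
  set s : Int := (Nat.sqrt m.toNat : Int) with hsdef
  have hs0 : 0 ≤ s := Int.natCast_nonneg _
  by_cases hmn : 0 ≤ m
  · by_cases hsq : s*s = m
    · -- square discriminant: the solutions are r and r+s
      have heven : Even ((a-s)*(a+s)) := ⟨2*(a*a - p) , by nlinarith⟩
      have hu : Even (a - s) := by
        rcases Int.even_mul.mp heven with h | h
        · exact h
        · obtain ⟨r, hr⟩ := h
          exact ⟨r - s, by omega⟩
      obtain ⟨r, hr⟩ := hu
      have hq_iff : ∀ b : Int, (a*a - a*b + b*b = p) ↔ (b = r ∨ b = r + s) := by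
        intro b
        constructor
        · intro hb
          rcases pv_roots p a b s hs0 (by omega) hb with h | h <;> omega
        · intro hb
          rcases hb with hb | hb <;>
          · subst hb
            rw [pv_key]
            nlinarith
      have hb1 : PySem.Int.floordiv (a - s) 2 = r := by
        rw [hr]; exact pv_floordiv_double r
      have hb2 : PySem.Int.floordiv (a + s) 2 = r + s := by
        have h' : a + s = (r+s) + (r+s) := by omega
        rw [h']; exact pv_floordiv_double (r+s)
      rw [if_pos ⟨hmn, hsq⟩, hb1, hb2]
      by_cases hr1 : 1 ≤ r
      · rw [if_neg (show ¬ (r < 1) by omega), if_pos hr1]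
        have hqr : a*a - a*r + r*r = p := (hq_iff r).mpr (Or.inl rfl)
        rw [pv_find?_pyRange_least _ (p+1) r (by have := pv_ble p a r hp hr1 hqr; omega)
          (by simp [hqr]) ((r - 1).toNat) 1 (by omega) hr1
          (fun x hx1 hx2 => by
            simp only [decide_eq_true_eq]
            intro hq
            rcases (hq_iff x).mp hq with h | h <;> omega)]
      · rw [if_pos (show r < 1 by omega)]
        by_cases hr2 : 1 ≤ r + s
        · rw [if_pos hr2]
          have hqr : a*a - a*(r+s) + (r+s)*(r+s) = p := (hq_iff (r+s)).mpr (Or.inr rfl)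
          rw [pv_find?_pyRange_least _ (p+1) (r+s) (by have := pv_ble p a (r+s) hp hr2 hqr; omega)
            (by simp [hqr]) ((r + s - 1).toNat) 1 (by omega) hr2
            (fun x hx1 hx2 => by
              simp only [decide_eq_true_eq]
              intro hq
              rcases (hq_iff x).mp hq with h | h <;> omega)]
        · rw [if_neg hr2]
          rw [pv_find?_pyRange_none _ 1 (p+1)
            (fun x hx1 hx2 => by
              simp only [decide_eq_true_eq]
              intro hq
              rcases (hq_iff x).mp hq with h | h <;> omega)]
    · -- m not a square: no solution
      rw [if_neg (by tauto)]
      rw [pv_find?_pyRange_none _ 1 (p+1)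
        (fun x hx1 hx2 => by
          simp only [decide_eq_true_eq]
          intro hq
          have := (pv_key p a x).mp hq
          exact hsq (pv_sqrt_eq m (2*x-a) (by omega)))]
  · -- negative discriminant: no solution
    rw [if_neg (by tauto)]
    rw [pv_find?_pyRange_none _ 1 (p+1)
      (fun x hx1 hx2 => by
        simp only [decide_eq_true_eq]
        intro hq
        have := (pv_key p a x).mp hq
        nlinarith [mul_self_nonneg (2*x-a)])]

lemma pv_Anone (p a : Int) (hp : 1 ≤ p) (ha : 0 ≤ a) (h : 4*p < 3*a*a) :
    (PySem.List.pyRange a (p+1) 1).findSome? (fun a' => pvInner p a') = none := by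
  rw [List.findSome?_eq_none_iff]
  intro x hx
  rw [PySem.List.mem_pyRange_one] at hx
  have hxx : 3*a*a ≤ 3*x*x := by nlinarith [hx.1]
  rw [pv_inner_eq p x hp (by omega)]
  have hnone : pvBmin p x = none := by
    unfold pvBmin
    rw [if_neg (by intro hc; omega)]
  rw [hnone]; rfl

lemma pv_main (p : Int) (hp : 1 ≤ p) :
    ∀ (n : Nat) (a s : Nat), (4*p + 1 - 3*(a:Int)*(a:Int)).toNat ≤ n →
      Nat.sqrt (4*p - 3*(a:Int)*(a:Int)).toNat ≤ s →
      (PySem.List.pyRange (a:Int) (p+1) 1).findSome? (fun a' => pvInner p a') = pvALoop p n a s := by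
  intro n
  induction n with
  | zero =>
    intro a s hn _
    have ha0 : (0:Int) ≤ (a:Int) := Int.natCast_nonneg a
    have hg : 4*p < 3*(a:Int)*(a:Int) := by omega
    show _ = none
    exact pv_Anone p (a:Int) hp ha0 hg
  | succ n ih =>
    intro a s hn hs
    have ha0 : (0:Int) ≤ (a:Int) := Int.natCast_nonneg a
    rw [pvALoop]
    by_cases hg : 3*(a:Int)*(a:Int) ≤ 4*p
    · rw [if_pos hg]
      simp only []
      have hap : (a:Int) ≤ p := by nlinarith
      set m : Int := 4*p - 3*(a:Int)*(a:Int) with hm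
      have hm0 : 0 ≤ m := by omega
      have hsd : pvSqrtDown m s = Nat.sqrt m.toNat := pv_sqrtDown_eq m s hm0 hs
      rw [PySem.List.pyRange_one_cons (by omega), List.findSome?_cons]
      rw [pv_inner_eq p (a:Int) hp ha0]
      have hc : ((a+1:Nat):Int) = (a:Int)+1 := by push_cast; ring
      have he : 3*((a:Int)+1)*((a:Int)+1) = 3*(a:Int)*(a:Int) + (6*(a:Int)+3) := by ring
      have hstep : (PySem.List.pyRange ((a:Int)+1) (p+1) 1).findSome? (fun a' => pvInner p a')
          = pvALoop p n (a+1) (pvSqrtDown m s) := by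
        have hs'' : Nat.sqrt (4*p - 3*((a+1:Nat):Int)*((a+1:Nat):Int)).toNat ≤ pvSqrtDown m s := by
          rw [hsd]
          apply Nat.sqrt_le_sqrt
          rw [hc, he]
          omega
        have := ih (a+1) (pvSqrtDown m s) (by rw [hc, he]; omega) hs''
        rw [hc] at this
        exact this
      rw [hsd] at hstep
      unfold pvBmin pvChoose
      simp only [← hm, hsd]
      by_cases hsq : ((Nat.sqrt m.toNat : Nat) : Int) * ((Nat.sqrt m.toNat : Nat) : Int) = m
      · rw [if_pos ⟨hm0, hsq⟩, if_pos hsq]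
        by_cases h1b : (1:Int) ≤ (if PySem.Int.floordiv ((a:Int) - (Nat.sqrt m.toNat : Int)) 2 < 1
            then PySem.Int.floordiv ((a:Int) + (Nat.sqrt m.toNat : Int)) 2
            else PySem.Int.floordiv ((a:Int) - (Nat.sqrt m.toNat : Int)) 2)
        · rw [if_pos h1b, if_pos h1b]
          rfl
        · rw [if_neg h1b, if_neg h1b]
          simpa using hstep
      · rw [if_neg (by tauto), if_neg hsq]
        simpa using hstep
    · rw [if_neg hg]
      exact pv_Anone p (a:Int) hp ha0 (by omega)

-- ===== VERDICT (by name: the statement is the Claim_ definition above) =====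
theorem factor_eisenstein_spec : Claim_equal_factor_eisenstein := by
  intro p _
  show factor_eisenstein p = factor_eisenstein_alt p
  unfold factor_eisenstein factor_eisenstein_alt
  by_cases h3 : p = 3
  · simp [h3]
  rw [if_neg h3, if_neg h3]
  by_cases h2 : PySem.Int.mod p 3 = 2
  · rw [if_pos h2, if_pos h2]
  rw [if_neg h2, if_neg h2]
  by_cases h1 : PySem.Int.mod p 3 = 1
  · rw [if_pos h1, if_pos h1]
    by_cases hp : 1 ≤ p
    · have hs0 : pvSqrtUp p (4*p).toNat 0 = Nat.sqrt (4*p).toNat :=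
        pv_sqrtUp_eq_aux p ((4*p).toNat) 0 (by simp) (by simpa using by omega)
      have := pv_main p hp ((4*p+1).toNat) 0 (pvSqrtUp p (4*p).toNat 0)
        (by simp) (by rw [hs0]; simp)
      simpa [pvInner] using this
    · -- p ≡ 1 (mod 3) and p ≤ 0 forces p ≤ -2: both sides return none
      have hdm := PySem.Int.floordiv_mul_add_mod p 3
      rw [h1] at hdm
      have hple : p ≤ -2 := by omega
      have hz : (4*p+1).toNat = 0 := by omega
      rw [hz]
      rw [show pvALoop p 0 0 (pvSqrtUp p (4*p).toNat 0) = none from rfl]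
      rw [List.findSome?_eq_none_iff]
      intro x hx
      rw [PySem.List.mem_pyRange_one] at hx
      omega
  · rw [if_neg h1, if_neg h1]
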